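-- pv_equiv track=rewrite | github.com/hyungmogu/algorithm-and-data-structure-exercises | interview_cake/greedy/highest_product_of_3_02.py | getLowestProductOfTwo
-- ===== SOURCE A (Python) =====
-- import functools
--
-- def getLowestProductOfTwo(list_of_ints):
--     lowest_val_list = [None, None]
--
--     for element in list_of_ints:
--         if lowest_val_list[1] == None or element < lowest_val_list[1]:
--             lowest_val_list[0] = lowest_val_list[1]
--             lowest_val_list[1] = element
--             continue
--
--         if lowest_val_list[0] == None or element < lowest_val_list[0]:
--             lowest_val_list[0] = element
--
--     return functools.reduce(lambda x,y: x*y, lowest_val_list)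
-- ===== SOURCE B (Python) =====
-- def getLowestProductOfTwo(list_of_ints):
--     s = sorted(list_of_ints)
--     return s[0] * s[1]
-- ===== Notes on version B (the rewrite author's own statement) =====
-- stated objective: simpler
-- what changed: B replaces A's single-scan tracking of the two lowest values in a None-padded two-slot list (finished by functools.reduce) with one sorted() call and the product of the first two elements.
import Mathlib
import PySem

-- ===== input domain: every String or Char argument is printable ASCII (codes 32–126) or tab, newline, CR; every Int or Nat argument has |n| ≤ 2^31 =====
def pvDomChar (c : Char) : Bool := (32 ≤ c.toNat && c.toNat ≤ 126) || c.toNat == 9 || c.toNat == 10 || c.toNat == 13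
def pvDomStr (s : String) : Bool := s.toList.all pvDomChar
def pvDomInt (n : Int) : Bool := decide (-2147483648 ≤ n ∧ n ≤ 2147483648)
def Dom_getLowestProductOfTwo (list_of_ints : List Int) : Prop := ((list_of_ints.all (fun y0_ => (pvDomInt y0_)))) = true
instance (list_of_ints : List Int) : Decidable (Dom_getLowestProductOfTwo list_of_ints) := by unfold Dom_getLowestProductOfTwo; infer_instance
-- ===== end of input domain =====

-- B sorts the list once and multiplies the two smallest elements instead of
-- tracking the two lowest values in a single scan (objective: simpler).


-- ===== PORT A =====
-- loop body of A: state = (lowest_val_list[0], lowest_val_list[1]), None = none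
def pvStepA (st : Option Int × Option Int) (element : Int) : Option Int × Option Int :=
  match st.2 with
  | none => (st.2, some element)                       -- lowest_val_list[1] == None branch
  | some b1 =>
    if element < b1 then (st.2, some element)          -- element < lowest_val_list[1]
    else
      match st.1 with
      | none => (some element, st.2)                   -- lowest_val_list[0] == None branch
      | some b0 => if element < b0 then (some element, st.2) else st

def getLowestProductOfTwo (list_of_ints : List Int) : Int :=
  let st := list_of_ints.foldl pvStepA (none, none)
  -- functools.reduce(x*y, [slot0, slot1]); with a None slot Python raises TypeError,
  -- excluded by Pre_ (the 0 is unreachable under Pre_)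
  match st.1, st.2 with
  | some a, some b => a * b
  | _, _ => 0

-- ===== PORT B =====
def getLowestProductOfTwo_alt (list_of_ints : List Int) : Int :=
  let s := PySem.List.sorted list_of_ints (fun y => y) false
  -- s[0] * s[1]; Python raises IndexError on fewer than two elements (outside Pre_)
  match s with
  | a :: b :: _ => a * b
  | _ => 0

-- ===== PRECONDITION & SPEC =====
-- Pre_ excludes lists with fewer than two elements, on which A raises TypeError
-- (reduce multiplies a None slot) and B raises IndexError.
def Pre_getLowestProductOfTwo (list_of_ints : List Int) : Prop := 2 ≤ list_of_ints.length
instance (list_of_ints : List Int) : Decidable (Pre_getLowestProductOfTwo list_of_ints) := by unfold Pre_getLowestProductOfTwo; infer_instance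
def pvWitness_getLowestProductOfTwo : List Int := [3, -1, 4, -1]
def Spec_getLowestProductOfTwo (list_of_ints : List Int) (out : Int) : Prop := out = getLowestProductOfTwo_alt list_of_ints
instance (list_of_ints : List Int) (out : Int) : Decidable (Spec_getLowestProductOfTwo list_of_ints out) := by unfold Spec_getLowestProductOfTwo; infer_instance

-- ===== CLAIM (what is proved, stated in full; the proofs are below) =====
def Claim_equal_getLowestProductOfTwo : Prop := ∀ (list_of_ints : List Int), Dom_getLowestProductOfTwo list_of_ints → Pre_getLowestProductOfTwo list_of_ints → Spec_getLowestProductOfTwo list_of_ints (getLowestProductOfTwo list_of_ints)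

-- ===== LEMMAS AND PROOFS =====

-- the two smallest entries of a sorted list, in A's slot order (slot0, slot1)
def pvTwo (s : List Int) : Option Int × Option Int :=
  match s with
  | [] => (none, none)
  | [a] => (none, some a)
  | a :: b :: _ => (some b, some a)

theorem pv_sorted_append_singleton (m : List Int) (x : Int) :
    PySem.List.sorted (m ++ [x]) (fun y => y) false
      = List.orderedInsert (· ≤ ·) x (PySem.List.sorted m (fun y => y) false) := by
  have hperm : (List.orderedInsert (· ≤ ·) x (PySem.List.sorted m (fun y => y) false)).Perm (m ++ [x]) :=
    (List.perm_orderedInsert _ _ _).trans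
      (((PySem.List.sorted_perm m (fun y => y) false).cons x).trans
        (List.perm_append_singleton x m).symm)
  have hpw : (List.orderedInsert (· ≤ ·) x (PySem.List.sorted m (fun y => y) false)).Pairwise (· ≤ ·) :=
    List.Pairwise.orderedInsert x _ (PySem.List.sorted_pairwise m (fun y => y))
  exact PySem.List.sorted_id_eq_of_perm_of_pairwise _ _ hperm hpw

theorem pv_step (m : List Int) (x : Int) :
    pvStepA (pvTwo (PySem.List.sorted m (fun y => y) false)) x
      = pvTwo (PySem.List.sorted (m ++ [x]) (fun y => y) false) := by
  rw [pv_sorted_append_singleton]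
  have hp := PySem.List.sorted_pairwise m (fun y => y)
  cases hs : PySem.List.sorted m (fun y => y) false with
  | nil => simp [pvStepA, pvTwo, List.orderedInsert]
  | cons a t =>
    cases t with
    | nil =>
      simp only [pvStepA, List.orderedInsert]
      split_ifs <;> simp [pvTwo] <;> omega
      -- a :: b :: t'
    | cons b t' =>
      rw [hs] at hp
      have hab : a ≤ b := List.rel_of_pairwise_cons hp (by simp)
      simp only [pvStepA, List.orderedInsert]
      split_ifs <;> simp [pvTwo] <;>
        first
          | omega
          | (split_ifs <;> simp <;> omega)

theorem pv_fold (l m : List Int) :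
    l.foldl pvStepA (pvTwo (PySem.List.sorted m (fun y => y) false))
      = pvTwo (PySem.List.sorted (m ++ l) (fun y => y) false) := by
  induction l generalizing m with
  | nil => simp
  | cons x l ih =>
    rw [List.foldl_cons, pv_step, ih]
    simp

-- ===== VERDICT (by name: the statement is the Claim_ definition above) =====
theorem getLowestProductOfTwo_spec : Claim_equal_getLowestProductOfTwo := by
  intro l _ hpre
  have h := pv_fold l []
  simp only [List.nil_append] at h
  have hlen : 2 ≤ (PySem.List.sorted l (fun y => y) false).length := by
    rw [PySem.List.length_sorted]; exact hpre
  unfold Spec_getLowestProductOfTwo getLowestProductOfTwo getLowestProductOfTwo_alt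
  simp only
  rw [show ((none, none) : Option Int × Option Int) = pvTwo (PySem.List.sorted [] (fun y => y) false) from rfl, h]
  cases hs : PySem.List.sorted l (fun y => y) false with
  | nil => rw [hs] at hlen; simp at hlen
  | cons a t =>
    cases t with
    | nil => rw [hs] at hlen; simp at hlen
    | cons b t' => simp [pvTwo, Int.mul_comm]
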